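-- pv_equiv track=rewrite | github.com/jpdown/clone-hero-lyric-adder | lyricAdder.py | organizeEvents
-- ===== SOURCE A (Python) =====
-- def findEvents(chart: list): #Finds the events section of chart file
--     eventsFound = False
--     for line in range(0, len(chart)): #Search for where to start manipulating things
--         if("Events" in chart[line]):
--             eventsStartLine = line
--             eventsFound = True
--         elif("}" in chart[line] and eventsFound):
--             eventsEndLine = line
--             eventsFound = False
--     return eventsStartLine, eventsEndLine
--
-- def organizeEvents(chart: list): #Takes in a chart and makes sure the event list is organized
--     events = []
--     eventsStartLine, eventsEndLine = findEvents(chart)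
--     for i in range(eventsStartLine + 2, eventsEndLine): #Start past lines [Events] and {
--         events.append(chart[i])
--
--     events.sort(key=lambda x: int(x.split()[0]))
--
--     #After events list sorted, return new chart file with sorted events list
--     newChart = replaceEvents(events, chart)
--     return newChart
--
-- def replaceEvents(events: list, chart: list): #Replaces previous event list with new event list in chart
--     eventsStartLine, eventsEndLine = findEvents(chart)
--
--     newChart = []
--     for line in range(len(chart)):
--         if(line == eventsStartLine + 2):
--             for event in events:
--                 newChart.append(event)
--         if(line >= eventsStartLine and line < eventsEndLine):
--             continue
--         newChart.append(chart[line])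
--
--     return(newChart)
-- ===== SOURCE B (Python) =====
-- def organizeEvents(chart: list):
--     # One backward traversal from the end of the chart with a flush-on-'}' state
--     # machine: 'mid' collects lines since the nearest '}' below, 'after' holds the
--     # finished tail; stopping at the first "Events" line seen from the end (= the
--     # last one) leaves mid = the section body (plus the '{' header) and after =
--     # everything from its closing '}' on.  Like A, the '[Events]' and '{' header
--     # lines are dropped from the result.
--     mid, after = [], []
--     i = len(chart) - 1
--     while "Events" not in chart[i]:
--         line = chart[i]
--         if "}" in line:
--             after = [line] + mid + after
--             mid = []
--         else:
--             mid = [line] + mid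
--         i -= 1
--     events = sorted(mid[1:], key=lambda x: int(x.split()[0]))
--     return chart[:i] + events + after
-- ===== Notes on version B (the rewrite author's own statement) =====
-- stated objective: alternative
-- what changed: B replaces A's two forward index scans (findEvents run twice) plus the line-by-line reconstruction loop by ONE backward traversal from the end of the chart: a flush-on-'}' accumulator state machine that stops at the first 'Events' line seen from the end and directly yields the prefix index, section body and finished tail, which are spliced with sorted() and concatenation.
-- outside the precondition, e.g. on organizeEvents(['Events', '}', 'Events']): A returns ['Events', '}', 'Events'], B returns ['Events', '}']
import Mathlib
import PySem

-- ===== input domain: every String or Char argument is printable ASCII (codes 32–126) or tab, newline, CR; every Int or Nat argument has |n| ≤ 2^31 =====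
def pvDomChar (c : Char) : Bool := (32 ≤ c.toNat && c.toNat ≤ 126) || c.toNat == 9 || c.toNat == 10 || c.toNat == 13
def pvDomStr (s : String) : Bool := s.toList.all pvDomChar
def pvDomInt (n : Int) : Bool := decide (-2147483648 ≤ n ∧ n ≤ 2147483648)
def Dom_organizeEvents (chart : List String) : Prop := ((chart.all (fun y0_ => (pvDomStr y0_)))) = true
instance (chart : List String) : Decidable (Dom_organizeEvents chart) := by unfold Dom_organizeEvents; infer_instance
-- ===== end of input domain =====

-- B replaces A's two forward index scans and line-by-line rebuild loop by one backward
-- flush-on-'}' accumulator traversal plus sort-and-concatenate splicing (return value only;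
-- like A it drops the two header lines).


-- ===== PORT A =====
-- findEvents: A's module helper.
-- State = (eventsFound, eventsStartLine?, eventsEndLine?); 'none' at the end = NameError.
def pvFindEvents (chart : List String) : Bool × Option Int × Option Int :=
  (PySem.List.pyRange 0 (chart.length : Int) 1).foldl
    (fun st line =>
      if PySem.Str.isIn "Events" (PySem.List.pyGetD chart line "") then (true, some line, st.2.2)
      else if PySem.Str.isIn "}" (PySem.List.pyGetD chart line "") && st.1 then (false, st.2.1, some line)
      else st)
    (false, none, none)

-- key of sort(key=lambda x: int(x.split()[0])); none = IndexError/ValueError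
def pvEventKey? (x : String) : Option Int := (PySem.Str.split₀ x).head?.bind PySem.Int.ofStr?

def pvReplaceEvents (events chart : List String) : List String :=
  match pvFindEvents chart with
  | (_, some s, some e) =>
      (PySem.List.pyRange 0 (chart.length : Int) 1).foldl
        (fun acc line =>
          let acc2 := if line = s + 2 then acc ++ events else acc
          if s ≤ line ∧ line < e then acc2 else acc2 ++ [PySem.List.pyGetD chart line ""])
        []
  | _ => []  -- NameError (outside Pre_)

def organizeEvents (chart : List String) : List String :=
  match pvFindEvents chart with
  | (_, some s, some e) =>
      let events := (PySem.List.pyRange (s + 2) e 1).foldl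
        (fun acc i => acc ++ [PySem.List.pyGetD chart i ""]) []
      if events.all (fun x => (pvEventKey? x).isSome) then
        pvReplaceEvents (PySem.List.sorted events (fun x => (pvEventKey? x).getD 0) false) chart
      else []  -- sort key raised (outside Pre_)
  | _ => []  -- NameError (outside Pre_)

-- ===== PORT B =====
-- B's backward while-loop: scan index i downward; a '}' line flushes mid into after,
-- any other line is prepended to mid; stop at the first "Events" line seen from the end.
-- Indices stay ≥ 0 here; the 'i = 0 and no Events' guard makes the recursion total and
-- returns none exactly where Python's loop would run past index 0 (and raise; outside Pre_).
def pvBScan (chart : List String) (i : Nat) (mid after : List String) :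
    Option (Nat × List String × List String) :=
  if PySem.Str.isIn "Events" (PySem.List.pyGetD chart (i : Int) "") then some (i, mid, after)
  else if i = 0 then none
  else if PySem.Str.isIn "}" (PySem.List.pyGetD chart (i : Int) "") then
    pvBScan chart (i - 1) [] ([PySem.List.pyGetD chart (i : Int) ""] ++ mid ++ after)
  else pvBScan chart (i - 1) ([PySem.List.pyGetD chart (i : Int) ""] ++ mid) after
  termination_by i

def organizeEvents_alt (chart : List String) : List String :=
  match pvBScan chart (chart.length - 1) [] [] with
  | none => []  -- no "Events" line: Python's backward scan runs off the list, IndexError (outside Pre_)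
  | some (i, mid, after) =>
      let events := PySem.List.slice mid (some 1) none  -- mid[1:] drops the '{' header
      if events.all (fun x => (pvEventKey? x).isSome) then
        PySem.List.slice chart none (some (i : Int))
          ++ PySem.List.sorted events (fun x => (pvEventKey? x).getD 0) false
          ++ after
      else []  -- sorted's key raised (outside Pre_)

-- ===== PRECONDITION & SPEC =====
-- Pre_ excludes (a) inputs where A raises (no "Events" line, no closing "}", a section line whose
-- first token is not an int) and (b) charts whose LAST "Events" line has no following "}" line
-- while an earlier section closed: there A's stale eventsEndLine makes it return the chart
-- unchanged by accident, while B's backward scan splices at the stale brace (or raises).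
def Pre_organizeEvents (chart : List String) : Prop :=
  ∃ i ∈ List.range chart.length, ∃ j ∈ List.range chart.length,
    i < j ∧
    PySem.Str.isIn "Events" (chart.getD i "") = true ∧
    (∀ k ∈ List.range chart.length, i < k → PySem.Str.isIn "Events" (chart.getD k "") = false) ∧
    PySem.Str.isIn "}" (chart.getD j "") = true ∧
    (∀ k ∈ List.range j, i < k → PySem.Str.isIn "}" (chart.getD k "") = false) ∧
    (∀ x ∈ (chart.drop (i + 2)).take (j - (i + 2)), (pvEventKey? x).isSome = true)
instance (chart : List String) : Decidable (Pre_organizeEvents chart) := by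
  unfold Pre_organizeEvents; infer_instance

def pvWitness_organizeEvents : List String := ["[Events]", "{", "10 E a", "2 E b", "}"]

def Spec_organizeEvents (chart : List String) (out : List String) : Prop := out = organizeEvents_alt chart
instance (chart : List String) (out : List String) : Decidable (Spec_organizeEvents chart out) := by unfold Spec_organizeEvents; infer_instance

-- ===== CLAIM (what is proved, stated in full; the proofs are below) =====
def Claim_equal_organizeEvents : Prop := ∀ (chart : List String), Dom_organizeEvents chart → Pre_organizeEvents chart → Spec_organizeEvents chart (organizeEvents chart)

-- ===== LEMMAS AND PROOFS =====

-- a foldl whose step fixes the state is the identity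
lemma pvFoldlFix {α β : Type} (f : β → α → β) (L : List α) (st : β)
    (h : ∀ x ∈ L, f st x = st) : L.foldl f st = st := by
  induction L with
  | nil => rfl
  | cons a t ih =>
      simp only [List.foldl_cons, h a (by simp)]
      exact ih (fun x hx => h x (by simp [hx]))

-- a pointwise-singleton flatMap is a map
lemma pvFlatMapMap {α β : Type} (l : List α) (g : α → List β) (f : α → β)
    (h : ∀ x ∈ l, g x = [f x]) : l.flatMap g = l.map f := by
  induction l with
  | nil => rfl
  | cons a t ih =>
      simp only [List.flatMap_cons, List.map_cons, h a (by simp)]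
      rw [ih (fun x hx => h x (by simp [hx]))]
      rfl

-- reading chart[a:b] index by index (A's event extraction)
lemma pvMapSeg (xs : List String) (a b : Nat) (hb : b ≤ xs.length) :
    (PySem.List.pyRange (a : Int) (b : Int) 1).map (fun idx => PySem.List.pyGetD xs idx "")
      = (xs.drop a).take (b - a) := by
  rw [PySem.List.pyRange_one]
  rw [List.map_map]
  by_cases hab : a ≤ b
  · have h1 : ((b : Int) - (a : Int)).toNat = b - a := by omega
    rw [h1]
    apply List.ext_getElem
    · simp; omega
    · intro m hm1 hm2
      have hmba : m < b - a := by simpa using hm1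
      simp only [List.getElem_map, List.getElem_range, Function.comp]
      have : (a : Int) + (m : Int) = ((a + m : Nat) : Int) := by push_cast; ring
      rw [this, PySem.List.pyGetD_natCast]
      have ham : a + m < xs.length := by omega
      rw [List.getD_eq_getElem _ _ ham]
      simp [List.getElem_take, List.getElem_drop]
  · have h1 : ((b : Int) - (a : Int)).toNat = 0 := by omega
    have h2 : b - a = 0 := by omega
    simp [h1, h2]

-- a flatMap hitting a single index of the range
lemma pvSingleHit {β : Type} (a t b : Int) (v : List β) (h1 : a ≤ t) (h2 : t < b) :
    (PySem.List.pyRange a b 1).flatMap (fun l => if l = t then v else []) = v := by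
  rw [PySem.List.pyRange_one_append a t b h1 (le_of_lt h2)]
  rw [List.flatMap_append]
  rw [PySem.List.pyRange_one_cons h2]
  have hpre : (PySem.List.pyRange a t 1).flatMap (fun l => if l = t then v else []) = [] := by
    rw [List.flatMap_eq_nil_iff]
    intro x hx
    have := PySem.List.mem_pyRange_one.mp hx
    simp [show x ≠ t by omega]
  have hpost : (PySem.List.pyRange (t+1) b 1).flatMap (fun l => if l = t then v else []) = [] := by
    rw [List.flatMap_eq_nil_iff]
    intro x hx
    have := PySem.List.mem_pyRange_one.mp hx
    simp [show x ≠ t by omega]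
  simp [hpre, hpost]

-- reading chart[x] for a nonnegative index
lemma pvGetNat (chart : List String) (x : Int) (hx : 0 ≤ x) :
    PySem.List.pyGetD chart x "" = chart.getD x.toNat "" := by
  rw [show x = ((x.toNat : Nat) : Int) by omega, PySem.List.pyGetD_natCast,
    show (((x.toNat : Nat) : Int)).toNat = x.toNat by omega]

-- under Pre_, findEvents returns exactly (last Events line, first } after it)
lemma pvFindEq (chart : List String) (i j : Nat) (hj : j < chart.length) (hij : i < j)
    (hE : PySem.Str.isIn "Events" (chart.getD i "") = true)
    (hEafter : ∀ k, k < chart.length → i < k → PySem.Str.isIn "Events" (chart.getD k "") = false)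
    (hB : PySem.Str.isIn "}" (chart.getD j "") = true)
    (hBmid : ∀ k, k < j → i < k → PySem.Str.isIn "}" (chart.getD k "") = false) :
    pvFindEvents chart = (false, some (i : Int), some (j : Int)) := by
  unfold pvFindEvents
  set f : (Bool × Option Int × Option Int) → Int → (Bool × Option Int × Option Int) :=
    (fun st line =>
        if PySem.Str.isIn "Events" (PySem.List.pyGetD chart line "") then (true, some line, st.2.2)
        else if PySem.Str.isIn "}" (PySem.List.pyGetD chart line "") && st.1 then (false, st.2.1, some line)
        else st) with hf
  have key : ∀ (x : Int), 0 ≤ x → x < (chart.length : Int) →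
      PySem.List.pyGetD chart x "" = chart.getD x.toNat "" := by
    intro x hx0 _
    exact pvGetNat chart x hx0
  rw [PySem.List.pyRange_one_append 0 (i : Int) (chart.length : Int) (by omega) (by omega)]
  rw [PySem.List.pyRange_one_append (i : Int) ((i : Int) + 1) (chart.length : Int) (by omega) (by omega)]
  rw [PySem.List.pyRange_one_append ((i : Int) + 1) (j : Int) (chart.length : Int) (by omega) (by omega)]
  rw [PySem.List.pyRange_one_append (j : Int) ((j : Int) + 1) (chart.length : Int) (by omega) (by omega)]
  rw [PySem.List.pyRange_one_singleton, PySem.List.pyRange_one_singleton]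
  simp only [List.foldl_append]
  set st0 := List.foldl f (false, none, none) (PySem.List.pyRange 0 (i : Int) 1) with hst0
  have step_i : List.foldl f st0 [(i : Int)] = (true, some (i : Int), st0.2.2) := by
    simp only [List.foldl_cons, List.foldl_nil, hf]
    rw [PySem.List.pyGetD_natCast, hE]
    simp
  rw [step_i]
  have mid : List.foldl f (true, some (i : Int), st0.2.2) (PySem.List.pyRange ((i : Int) + 1) (j : Int) 1)
      = (true, some (i : Int), st0.2.2) := by
    apply pvFoldlFix
    intro x hx
    have hxr := PySem.List.mem_pyRange_one.mp hx
    rw [hf]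
    beta_reduce
    rw [key x (by omega) (by omega)]
    have h1 : PySem.Str.isIn "Events" (chart.getD x.toNat "") = false :=
      hEafter x.toNat (by omega) (by omega)
    have h2 : PySem.Str.isIn "}" (chart.getD x.toNat "") = false :=
      hBmid x.toNat (by omega) (by omega)
    rw [h1, h2]
    simp
  rw [mid]
  have step_j : List.foldl f (true, some (i : Int), st0.2.2) [(j : Int)]
      = (false, some (i : Int), some (j : Int)) := by
    simp only [List.foldl_cons, List.foldl_nil, hf]
    rw [PySem.List.pyGetD_natCast]
    have h1 : PySem.Str.isIn "Events" (chart.getD j "") = false := hEafter j hj hij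
    rw [h1, hB]
    simp
  rw [step_j]
  apply pvFoldlFix
  intro x hx
  have hxr := PySem.List.mem_pyRange_one.mp hx
  rw [hf]
  beta_reduce
  rw [key x (by omega) (by omega)]
  have h1 : PySem.Str.isIn "Events" (chart.getD x.toNat "") = false :=
    hEafter x.toNat (by omega) (by omega)
  rw [h1]
  simp

-- A's reconstruction loop is slicing-and-splicing
lemma pvReplaceEq (chart events : List String) (i j : Nat) (hij : i < j) (hj : j < chart.length)
    (hfind : pvFindEvents chart = (false, some (i : Int), some (j : Int)))
    (hev : j ≤ i + 2 → events = []) :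
    pvReplaceEvents events chart = chart.take i ++ events ++ chart.drop j := by
  have hg : (fun (acc : List String) (line : Int) =>
        let acc2 := if line = (i : Int) + 2 then acc ++ events else acc
        if (i : Int) ≤ line ∧ line < (j : Int) then acc2 else acc2 ++ [PySem.List.pyGetD chart line ""])
      = (fun acc line => acc ++ ((if line = (i : Int) + 2 then events else []) ++
          (if (i : Int) ≤ line ∧ line < (j : Int) then [] else [PySem.List.pyGetD chart line ""]))) := by
    funext acc line
    by_cases h1 : line = (i : Int) + 2 <;> by_cases h2 : (i : Int) ≤ line ∧ line < (j : Int) <;>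
      simp [h1, h2] <;> split_ifs <;> simp
  set g : Int → List String := (fun line => ((if line = (i : Int) + 2 then events else []) ++
          (if (i : Int) ≤ line ∧ line < (j : Int) then [] else [PySem.List.pyGetD chart line ""]))) with hgdef
  have hseg1 : (PySem.List.pyRange 0 (i : Int) 1).flatMap g = chart.take i := by
    rw [pvFlatMapMap _ g (fun line => PySem.List.pyGetD chart line "")]
    · have := pvMapSeg chart 0 i (by omega)
      simpa using this
    · intro x hx
      have hxr := PySem.List.mem_pyRange_one.mp hx
      rw [hgdef]
      simp [show x ≠ (i : Int) + 2 by omega, show ¬((i : Int) ≤ x ∧ x < (j : Int)) by omega]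
  have hseg3 : (PySem.List.pyRange (j : Int) (chart.length : Int) 1).flatMap g = chart.drop j := by
    rw [pvFlatMapMap _ g (fun line => PySem.List.pyGetD chart line "")]
    · have := pvMapSeg chart j chart.length (by omega)
      rw [this]
      exact List.take_of_length_le (by simp)
    · intro x hx
      have hxr := PySem.List.mem_pyRange_one.mp hx
      rw [hgdef]
      by_cases h1 : x = (i : Int) + 2
      · have hje : j ≤ i + 2 := by omega
        simp [h1, hev hje]
        omega
      · simp [h1, show ¬((i : Int) ≤ x ∧ x < (j : Int)) by omega]
  have hseg2 : (PySem.List.pyRange (i : Int) (j : Int) 1).flatMap g = events := by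
    have hmid : ∀ x ∈ PySem.List.pyRange (i : Int) (j : Int) 1,
        g x = (if x = (i : Int) + 2 then events else []) := by
      intro x hx
      have hxr := PySem.List.mem_pyRange_one.mp hx
      rw [hgdef]
      simp [show (i : Int) ≤ x ∧ x < (j : Int) from ⟨hxr.1, hxr.2⟩]
    by_cases hcase : i + 2 < j
    · calc (PySem.List.pyRange (i : Int) (j : Int) 1).flatMap g
          = (PySem.List.pyRange (i : Int) (j : Int) 1).flatMap
              (fun x => if x = (i : Int) + 2 then events else []) := by
            rw [List.flatMap_def, List.flatMap_def, List.map_congr_left hmid]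
        _ = events := pvSingleHit _ _ _ _ (by omega) (by omega)
    · have hev' : events = [] := hev (by omega)
      rw [hev']
      rw [List.flatMap_eq_nil_iff]
      intro x hx
      have hxr := PySem.List.mem_pyRange_one.mp hx
      rw [hmid x hx]
      simp [show x ≠ (i : Int) + 2 by omega]
  unfold pvReplaceEvents
  rw [hfind]
  simp only [hg]
  rw [PySem.List.foldl_append_eq_flatMap g _ []]
  rw [PySem.List.pyRange_one_append 0 (i : Int) (chart.length : Int) (by omega) (by omega),
      PySem.List.pyRange_one_append (i : Int) (j : Int) (chart.length : Int) (by omega) (by omega),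
      List.flatMap_append, List.flatMap_append, hseg1, hseg2, hseg3]
  simp

-- B's backward scan below the closing brace: mid accumulates chart(i, k]
lemma pvScanLow (chart : List String) (i j : Nat) (hj : j < chart.length)
    (hE : PySem.Str.isIn "Events" (chart.getD i "") = true)
    (hEafter : ∀ k, k < chart.length → i < k → PySem.Str.isIn "Events" (chart.getD k "") = false)
    (hBmid : ∀ k, k < j → i < k → PySem.Str.isIn "}" (chart.getD k "") = false) :
    ∀ d mid after, i + d < j →
      pvBScan chart (i + d) mid after
        = some (i, ((chart.drop (i + 1)).take d) ++ mid, after) := by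
  intro d
  induction d with
  | zero =>
      intro mid after _
      unfold pvBScan
      simp only [Nat.add_zero]
      rw [pvGetNat chart (i : Int) (by omega),
        show (((i : Nat) : Int)).toNat = i by omega, hE]
      simp
  | succ d ih =>
      intro mid after hlt
      unfold pvBScan
      rw [pvGetNat chart ((i + (d + 1) : Nat) : Int) (by omega)]
      have hk : ((((i + (d + 1) : Nat)) : Int)).toNat = i + (d + 1) := by omega
      rw [hk]
      have h1 : PySem.Str.isIn "Events" (chart.getD (i + (d + 1)) "") = false :=
        hEafter _ (by omega) (by omega)
      have h2 : PySem.Str.isIn "}" (chart.getD (i + (d + 1)) "") = false :=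
        hBmid _ (by omega) (by omega)
      rw [h1, h2]
      simp only [Bool.false_eq_true, if_false, show ¬(i + (d + 1) = 0) by omega, if_false,
        show i + (d + 1) - 1 = i + d by omega]
      rw [ih _ after (by omega)]
      have hget : chart.getD (i + (d + 1)) "" = (chart.drop (i + 1)).getD d "" := by
        rw [List.getD_eq_getElem?_getD, List.getD_eq_getElem?_getD, List.getElem?_drop,
          show i + 1 + d = i + (d + 1) by omega]
      have htake : (chart.drop (i + 1)).take (d + 1)
          = (chart.drop (i + 1)).take d ++ [(chart.drop (i + 1)).getD d ""] := by
        have hd : d < (chart.drop (i + 1)).length := by simp; omega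
        rw [List.getD_eq_getElem _ _ hd, ← List.take_concat_get']
      rw [hget, htake]
      simp

-- B's backward scan at and above the closing brace
lemma pvScanHigh (chart : List String) (i j : Nat) (hj : j < chart.length) (hij : i < j)
    (hE : PySem.Str.isIn "Events" (chart.getD i "") = true)
    (hEafter : ∀ k, k < chart.length → i < k → PySem.Str.isIn "Events" (chart.getD k "") = false)
    (hB : PySem.Str.isIn "}" (chart.getD j "") = true)
    (hBmid : ∀ k, k < j → i < k → PySem.Str.isIn "}" (chart.getD k "") = false) :
    ∀ d mid after, j + d < chart.length →
      pvBScan chart (j + d) mid after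
        = some (i, (chart.drop (i + 1)).take (j - 1 - i),
            ((chart.drop j).take (d + 1)) ++ mid ++ after) := by
  intro d
  induction d with
  | zero =>
      intro mid after _
      unfold pvBScan
      simp only [Nat.add_zero]
      rw [pvGetNat chart ((j : Nat) : Int) (by omega)]
      have hk : (((j : Nat) : Int)).toNat = j := by omega
      rw [hk]
      have h1 : PySem.Str.isIn "Events" (chart.getD j "") = false := hEafter _ hj hij
      rw [h1, hB]
      simp only [Bool.false_eq_true, if_false, show ¬(j = 0) by omega, if_false, if_true]
      rw [show j - 1 = i + (j - 1 - i) by omega,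
        pvScanLow chart i j hj hE hEafter hBmid (j - 1 - i) _ _ (by omega)]
      have hget : chart.getD j "" = (chart.drop j).getD 0 "" := by
        rw [List.getD_eq_getElem?_getD, List.getD_eq_getElem?_getD, List.getElem?_drop]
        simp
      have htake : (chart.drop j).take 1 = [(chart.drop j).getD 0 ""] := by
        have hd : 0 < (chart.drop j).length := by simp; omega
        cases hcl : chart.drop j with
        | nil => rw [hcl] at hd; simp at hd
        | cons a t => simp
      rw [hget, htake]
      simp
  | succ d ih =>
      intro mid after hlt
      unfold pvBScan
      rw [pvGetNat chart ((j + (d + 1) : Nat) : Int) (by omega)]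
      have hk : (((j + (d + 1) : Nat) : Int)).toNat = j + (d + 1) := by omega
      rw [hk]
      have h1 : PySem.Str.isIn "Events" (chart.getD (j + (d + 1)) "") = false :=
        hEafter _ (by omega) (by omega)
      rw [h1]
      simp only [Bool.false_eq_true, if_false, show ¬(j + (d + 1) = 0) by omega, if_false,
        show j + (d + 1) - 1 = j + d by omega]
      have hget : chart.getD (j + (d + 1)) "" = (chart.drop j).getD (d + 1) "" := by
        rw [List.getD_eq_getElem?_getD, List.getD_eq_getElem?_getD, List.getElem?_drop]
      have htake : (chart.drop j).take (d + 2)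
          = (chart.drop j).take (d + 1) ++ [(chart.drop j).getD (d + 1) ""] := by
        have hd : d + 1 < (chart.drop j).length := by simp; omega
        rw [List.getD_eq_getElem _ _ hd, ← List.take_concat_get']
      by_cases hbr : PySem.Str.isIn "}" (chart.getD (j + (d + 1)) "") = true
      · rw [if_pos hbr, ih [] _ (by omega)]
        rw [hget, htake]
        simp
      · rw [if_neg hbr, ih _ after (by omega)]
        rw [hget, htake]
        simp

-- ===== VERDICT (by name: the statement is the Claim_ definition above) =====
theorem organizeEvents_spec : Claim_equal_organizeEvents := by
  intro chart _ hpre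
  obtain ⟨i, hi, j, hjm, hij, hE, hEafter, hB, hBmid, hkeys⟩ := hpre
  have hjn : j < chart.length := List.mem_range.mp hjm
  have hin : i < chart.length := List.mem_range.mp hi
  have hEafter' : ∀ k, k < chart.length → i < k → PySem.Str.isIn "Events" (chart.getD k "") = false :=
    fun k hk hik => hEafter k (List.mem_range.mpr hk) hik
  have hBmid' : ∀ k, k < j → i < k → PySem.Str.isIn "}" (chart.getD k "") = false :=
    fun k hk hik => hBmid k (List.mem_range.mpr hk) hik
  have hfind := pvFindEq chart i j hjn hij hE hEafter' hB hBmid'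
  have hscan : pvBScan chart (chart.length - 1) [] []
      = some (i, (chart.drop (i + 1)).take (j - 1 - i), chart.drop j) := by
    rw [show chart.length - 1 = j + (chart.length - 1 - j) by omega,
      pvScanHigh chart i j hjn hij hE hEafter' hB hBmid' _ [] [] (by omega)]
    have : (chart.drop j).take (chart.length - 1 - j + 1) = chart.drop j :=
      List.take_of_length_le (by simp; omega)
    rw [this]
    simp
  show organizeEvents chart = organizeEvents_alt chart
  unfold organizeEvents organizeEvents_alt
  rw [hfind, hscan]
  have hcast : (i : Int) + 2 = ((i + 2 : Nat) : Int) := by push_cast; ring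
  have hevA : (PySem.List.pyRange ((i : Int) + 2) (j : Int) 1).foldl
      (fun acc idx => acc ++ [PySem.List.pyGetD chart idx ""]) []
      = (chart.drop (i + 2)).take (j - (i + 2)) := by
    rw [PySem.List.foldl_append_singleton_eq_map, hcast, pvMapSeg chart (i + 2) j (by omega)]
    simp
  have hevB : PySem.List.slice ((chart.drop (i + 1)).take (j - 1 - i)) (some 1) none
      = (chart.drop (i + 2)).take (j - (i + 2)) := by
    rw [show (1 : Int) = ((1 : Nat) : Int) by norm_num, PySem.List.slice_from_natCast]
    rw [List.drop_take, List.drop_drop]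
    congr 1
    omega
  simp only [hevA, hevB]
  by_cases hall : ((chart.drop (i + 2)).take (j - (i + 2))).all (fun x => (pvEventKey? x).isSome)
  · rw [if_pos hall, if_pos hall]
    rw [pvReplaceEq chart _ i j hij hjn hfind
      (by intro hje
          rw [show j - (i + 2) = 0 by omega]
          simp
          rfl)]
    rw [PySem.List.slice_to_natCast]
  · rw [if_neg hall, if_neg hall]
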